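-- pv_equiv track=rewrite | github.com/Kelsidavis/Decomp | tools/function_hunt/run_autodiscover.py | _group_iat
-- ===== SOURCE A (Python) =====
-- from typing import Any, Dict, List, Optional, Tuple
--
-- def _group_iat(imports: List[str]) -> Dict[str, List[str]]:
--     out: Dict[str, List[str]] = {}
--     for imp in imports or []:
--         dll, sym = None, None
--         if "!" in imp: dll, sym = imp.split("!", 1)
--         elif "." in imp: dll, sym = imp.split(".", 1)
--         else: dll, sym = "unknown", imp
--         dll = dll.replace(".dll", "").upper()
--         out.setdefault(dll, [])
--         if sym not in out[dll]:
--             out[dll].append(sym)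
--     return out
-- ===== SOURCE B (Python) =====
-- def _key_sym(imp):
--     for sep in ("!", "."):
--         if sep in imp:
--             dll, sym = imp.split(sep, 1)
--             break
--     else:
--         dll, sym = "unknown", imp
--     return dll.replace(".dll", "").upper(), sym
--
-- def _group_iat(imports):
--     pairs = [_key_sym(imp) for imp in imports or []]
--     dlls = list(dict.fromkeys(d for d, _ in pairs))
--     return {d: list(dict.fromkeys(s for dd, s in pairs if dd == d)) for d in dlls}
-- ===== Notes on version B (the rewrite author's own statement) =====
-- stated objective: alternative
-- what changed: B maintains no dict/accumulator while traversing: it precomputes all (dll, sym) pairs, derives the first-occurrence-ordered list of distinct DLLs, and builds each group independently by a per-DLL filtering scan over the pair list with an order-preserving dedup, replacing A's single loop that incrementally grows a dict with a dupe-free invariant.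
import Mathlib
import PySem

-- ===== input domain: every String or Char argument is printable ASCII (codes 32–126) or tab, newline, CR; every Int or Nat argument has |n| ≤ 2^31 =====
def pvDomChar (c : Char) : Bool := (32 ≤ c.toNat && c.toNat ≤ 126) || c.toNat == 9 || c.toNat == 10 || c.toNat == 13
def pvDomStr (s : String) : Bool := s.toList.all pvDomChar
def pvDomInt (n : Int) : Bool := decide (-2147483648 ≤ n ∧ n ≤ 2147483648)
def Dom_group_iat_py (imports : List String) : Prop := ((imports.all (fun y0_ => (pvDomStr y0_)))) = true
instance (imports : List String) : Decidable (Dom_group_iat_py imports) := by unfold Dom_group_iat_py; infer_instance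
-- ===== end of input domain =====

-- B keeps no accumulator during traversal: it precomputes all (dll, sym) pairs, lists the
-- distinct DLLs in first-occurrence order, and builds each group by an independent per-DLL
-- filtering scan, instead of A's single loop growing a dict with a dupe-free invariant.

-- ===== PORT A =====
-- Literal transliteration of A: one dict, per-import branch logic, setdefault,
-- then append only if the symbol is not already in the list.
def group_iat_py (imports : List String) : List (String × List String) :=
  (imports.foldl (fun (out : PySem.Dict String (List String)) imp =>
    let p : String × String :=
      -- tuple unpack of split(sep, 1): first and second piece (the sep occurs, so
      -- the split has exactly two pieces; splitMax? is some since sep is nonempty)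
      if PySem.Str.isIn "!" imp then
        let parts := (PySem.Str.splitMax? imp "!" 1).getD []
        (parts.headD "", (parts.drop 1).headD "")
      else if PySem.Str.isIn "." imp then
        let parts := (PySem.Str.splitMax? imp "." 1).getD []
        (parts.headD "", (parts.drop 1).headD "")
      else ("unknown", imp)
    let dll := PySem.Str.upper (PySem.Str.replace p.1 ".dll" "")
    let out1 := out.setdefault dll []
    let cur := out1.getD dll []
    if p.2 ∈ cur then out1 else out1.insert dll (cur ++ [p.2])) PySem.Dict.empty).items

-- ===== PORT B =====
-- B-side helper: the for/break over the two separators, then normalize the dll part.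
def keySym (imp : String) : String × String :=
  let ds : String × String :=
    match ["!", "."].find? (fun sep => PySem.Str.isIn sep imp) with
    | some sep =>
      let parts := (PySem.Str.splitMax? imp sep 1).getD []
      (parts.headD "", (parts.drop 1).headD "")
    | none => ("unknown", imp)
  (PySem.Str.upper (PySem.Str.replace ds.1 ".dll" ""), ds.2)

-- pairs of (dll, sym); distinct dlls in first-occurrence order; per-dll filter + dedup.
def group_iat_py_alt (imports : List String) : List (String × List String) :=
  let pairs := imports.map keySym
  let dlls := PySem.Set.ofList (pairs.map (·.1))
  dlls.map (fun d =>
    (d, PySem.Set.ofList ((pairs.filter (fun p => p.1 == d)).map (·.2))))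

-- ===== PRECONDITION & SPEC =====
def Spec_group_iat_py (imports : List String) (out : List (String × List String)) : Prop := out = group_iat_py_alt imports
instance (imports : List String) (out : List (String × List String)) : Decidable (Spec_group_iat_py imports out) := by unfold Spec_group_iat_py; infer_instance

-- ===== CLAIM (what is proved, stated in full; the proofs are below) =====
def Claim_equal_group_iat_py : Prop := ∀ (imports : List String), Dom_group_iat_py imports → Spec_group_iat_py imports (group_iat_py imports)

-- ===== LEMMAS AND PROOFS =====

-- A's loop body, as a function of the precomputed (dll, sym) pair.
def stepA (out : PySem.Dict String (List String)) (p : String × String) : PySem.Dict String (List String) :=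
  let out1 := out.setdefault p.1 []
  let cur := out1.getD p.1 []
  if p.2 ∈ cur then out1 else out1.insert p.1 (cur ++ [p.2])

theorem group_iat_py_eq_foldl_stepA (imports : List String) :
    group_iat_py imports = ((imports.map keySym).foldl stepA PySem.Dict.empty).items := by
  unfold group_iat_py
  rw [List.foldl_map]
  apply congrArg PySem.Dict.items
  apply List.foldl_ext
  intro out imp _
  by_cases h1 : PySem.Str.isIn "!" imp = true
  · simp only [stepA, keySym, List.find?_cons, h1, if_pos]
  · by_cases h2 : PySem.Str.isIn "." imp = true <;>
      simp only [stepA, keySym, List.find?_cons, List.find?_nil, h1, h2,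
        if_neg, if_pos, Bool.false_eq_true, not_false_iff]

theorem keys_stepA (d : PySem.Dict String (List String)) (p : String × String) :
    (stepA d p).keys = PySem.Set.add d.keys p.1 := by
  by_cases hc : d.contains p.1 = true
  · have hm : p.1 ∈ d.keys := (PySem.Dict.contains_iff_mem_keys d p.1).mp hc
    simp only [stepA, PySem.Dict.setdefault_of_contains d _ hc, PySem.Set.add_of_mem hm]
    split_ifs <;> simp [PySem.Dict.keys_insert_of_contains d _ hc]
  · have hc' : d.contains p.1 = false := by simpa using hc
    have hm : p.1 ∉ d.keys := fun h => hc ((PySem.Dict.contains_iff_mem_keys d p.1).mpr h)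
    simp only [stepA, PySem.Dict.setdefault_of_not_contains d _ hc',
      PySem.Dict.getD_insert_self, List.not_mem_nil, if_false,
      PySem.Dict.insert_insert_self, PySem.Set.add_of_not_mem hm]
    simp [PySem.Dict.keys_insert_of_not_contains d _ hc']

theorem keys_foldl_stepA (l : List (String × String)) (d : PySem.Dict String (List String)) :
    (l.foldl stepA d).keys = PySem.Set.update d.keys (l.map (·.1)) := by
  induction l generalizing d with
  | nil => simp [PySem.Set.update_nil]
  | cons p l ih =>
    simp only [List.foldl_cons, List.map_cons, PySem.Set.update_cons, ih, keys_stepA]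

theorem getD_stepA (d : PySem.Dict String (List String)) (p : String × String) (k : String) :
    (stepA d p).getD k [] = if p.1 = k then PySem.Set.add (d.getD k []) p.2 else d.getD k [] := by
  simp only [stepA]
  by_cases hc : d.contains p.1 = true
  · rw [PySem.Dict.setdefault_of_contains d _ hc]
    by_cases hm : p.2 ∈ d.getD p.1 ([] : List String)
    · rw [if_pos hm]
      by_cases hk : p.1 = k
      · subst hk; rw [if_pos rfl, PySem.Set.add_of_mem hm]
      · rw [if_neg hk]
    · rw [if_neg hm]
      by_cases hk : p.1 = k
      · subst hk
        rw [if_pos rfl, PySem.Dict.getD_insert_self, PySem.Set.add_of_not_mem hm]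
      · rw [if_neg hk, PySem.Dict.getD_insert, if_neg (Ne.symm hk)]
  · have hc' : d.contains p.1 = false := by simpa using hc
    have h0 : d.getD p.1 ([] : List String) = [] := PySem.Dict.getD_of_not_contains d _ hc'
    rw [PySem.Dict.setdefault_of_not_contains d _ hc', PySem.Dict.getD_insert_self]
    simp only [List.not_mem_nil, if_false, PySem.Dict.insert_insert_self]
    by_cases hk : p.1 = k
    · subst hk
      rw [if_pos rfl, PySem.Dict.getD_insert_self, h0,
        PySem.Set.add_of_not_mem (List.not_mem_nil)]
    · rw [if_neg hk, PySem.Dict.getD_insert, if_neg (Ne.symm hk)]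

theorem getD_foldl_stepA (l : List (String × String)) (d : PySem.Dict String (List String)) (k : String) :
    (l.foldl stepA d).getD k [] =
      PySem.Set.update (d.getD k []) ((l.filter (fun p => p.1 == k)).map (·.2)) := by
  induction l generalizing d with
  | nil => simp [PySem.Set.update_nil]
  | cons p l ih =>
    simp only [List.foldl_cons, List.filter_cons, ih, getD_stepA]
    by_cases h : p.1 = k <;> simp [h, PySem.Set.update_cons]

-- ===== VERDICT (by name: the statement is the Claim_ definition above) =====
theorem group_iat_py_spec : Claim_equal_group_iat_py := by
  intro imports _
  unfold Spec_group_iat_py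
  rw [group_iat_py_eq_foldl_stepA]
  unfold group_iat_py_alt
  set pairs := imports.map keySym with hp
  have hkA : ((pairs.foldl stepA PySem.Dict.empty).keys) = PySem.Set.ofList (pairs.map (·.1)) := by
    rw [keys_foldl_stepA]; simp [PySem.Dict.keys_empty, PySem.Set.update_nil_left]
  have hndA : ((pairs.foldl stepA PySem.Dict.empty).keys).Nodup := by
    rw [hkA]; exact PySem.Set.nodup_ofList _
  rw [PySem.Dict.items_eq_map_keys _ hndA ([] : List String), hkA]
  apply List.map_congr_left
  intro k _
  congr 1
  rw [getD_foldl_stepA]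
  simp [PySem.Dict.getD_empty, PySem.Set.update_nil_left]
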